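-- pv_equiv track=rewrite | github.com/VMSTR8/Junior-python-developer-Test-Task | task3.py | presence
-- ===== SOURCE A (Python) =====
-- import itertools
-- from typing import Generator
--
-- def all_timestamps(massive: dict) -> Generator:
--     for iteration in massive.values():
--         yield from zip(iteration, itertools.cycle((-1, 1)))
--
-- def presence(massive: dict) -> Generator:
--     counter_previous = 0
--     for time, border in sorted(all_timestamps(massive)):
--         counter_next = counter_previous + border
--         if counter_previous == -2 and counter_next == -3:
--             yield time, border
--         if counter_previous == -3 and counter_next == -2:
--             yield time, border
--         counter_previous = counter_next
-- ===== SOURCE B (Python) =====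
-- import itertools
--
--
-- def all_timestamps(massive: dict):
--     for iteration in massive.values():
--         yield from zip(iteration, itertools.cycle((-1, 1)))
--
--
-- def presence(massive: dict):
--     # Group the sorted event stream by timestamp.  Within one timestamp the
--     # counter first drops by the number of -1 borders, then rises by the number
--     # of +1 borders, so each group can cross the -2/-3 boundary at most once in
--     # each direction, decided by a closed-form test on the group's counts --
--     # no per-event running counter is maintained.
--     events = sorted(all_timestamps(massive))
--     counter = 0
--     for time, group in itertools.groupby(events, key=lambda e: e[0]):
--         borders = [b for _, b in group]
--         starts = borders.count(-1)
--         ends = len(borders) - starts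
--         low = counter - starts
--         if counter >= -2 and low <= -3:
--             yield time, -1
--         if low <= -3 and low + ends >= -2:
--             yield time, 1
--         counter = low + ends
-- ===== Notes on version B (the rewrite author's own statement) =====
-- stated objective: alternative
-- what changed: Instead of A's per-event running-counter state machine, B groups the sorted event stream by timestamp (itertools.groupby) and decides each group's boundary crossings by a closed-form test on the group's -1/+1 counts (the counter within a timestamp drops then rises, so each direction crosses at most once), emitting (time,-1) or (time,1) per group.
import Mathlib
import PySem

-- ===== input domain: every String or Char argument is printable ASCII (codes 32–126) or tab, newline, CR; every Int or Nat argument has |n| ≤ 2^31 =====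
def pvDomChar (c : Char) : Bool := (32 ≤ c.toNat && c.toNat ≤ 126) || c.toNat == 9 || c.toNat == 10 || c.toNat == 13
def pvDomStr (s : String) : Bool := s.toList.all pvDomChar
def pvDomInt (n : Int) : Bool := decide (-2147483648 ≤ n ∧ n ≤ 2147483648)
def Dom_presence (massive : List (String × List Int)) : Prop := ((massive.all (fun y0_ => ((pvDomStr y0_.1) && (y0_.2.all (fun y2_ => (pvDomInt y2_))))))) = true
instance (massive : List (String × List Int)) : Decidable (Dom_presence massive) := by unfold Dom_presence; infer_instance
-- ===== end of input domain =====

-- B replaces A's per-event running-counter state machine by grouping the sorted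
-- events per timestamp and deciding each group's crossings by closed-form count
-- tests (alternative decomposition, same cost).

-- ===== PORT A =====
-- zip(iteration, itertools.cycle((-1, 1))): borders alternate starting at -1
def pvCycleZip : List Int → Int → List (Int × Int)
  | [], _ => []
  | t :: ts, b => (t, b) :: pvCycleZip ts (-b)

-- all_timestamps: a module helper both Source A and Source B use unchanged
def pvAllTimestamps (massive : List (String × List Int)) : List (Int × Int) :=
  massive.flatMap (fun p => pvCycleZip p.2 (-1))

-- A's for-loop over the sorted events, carrying counter_previous and yielding
def pvLoopA : Int → List (Int × Int) → List (Int × Int)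
  | _, [] => []
  | c, tb :: rest =>
    let cn := c + tb.2
    ((if c = -2 ∧ cn = -3 then [tb] else []) ++
     (if c = -3 ∧ cn = -2 then [tb] else [])) ++ pvLoopA cn rest

def presence (massive : List (String × List Int)) : List (Int × Int) :=
  pvLoopA 0 (PySem.List.sorted2 (pvAllTimestamps massive) Prod.fst Prod.snd)

-- ===== PORT B =====
-- itertools.groupby(events, key=fst): consecutive run of one timestamp, as that
-- timestamp together with the borders [b for _, b in group]
def pvGroupBy : List (Int × Int) → List (Int × List Int)
  | [] => []
  | (t, b) :: rest =>
    (t, b :: (rest.takeWhile (fun p => p.1 == t)).map Prod.snd) ::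
      pvGroupBy (rest.dropWhile (fun p => p.1 == t))
  termination_by l => l.length
  decreasing_by
    have := (List.dropWhile_sublist (l := rest) (p := fun p => p.1 == t)).length_le
    simp only [List.length_cons]; omega

-- Source B's loop over the groups: counts of -1/+1 borders decide the crossings
def pvLoopB : Int → List (Int × List Int) → List (Int × Int)
  | _, [] => []
  | c, (t, borders) :: gs =>
    let starts : Int := borders.count (-1)
    let ends : Int := (borders.length : Int) - starts
    let low := c - starts
    ((if c ≥ -2 ∧ low ≤ -3 then [(t, -1)] else []) ++
     (if low ≤ -3 ∧ low + ends ≥ -2 then [(t, 1)] else [])) ++ pvLoopB (low + ends) gs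

def presence_alt (massive : List (String × List Int)) : List (Int × Int) :=
  pvLoopB 0 (pvGroupBy (PySem.List.sorted2 (pvAllTimestamps massive) Prod.fst Prod.snd))

-- ===== PRECONDITION & SPEC =====
def Spec_presence (massive : List (String × List Int)) (out : List (Int × Int)) : Prop := out = presence_alt massive
instance (massive : List (String × List Int)) (out : List (Int × Int)) : Decidable (Spec_presence massive out) := by unfold Spec_presence; infer_instance

-- ===== CLAIM (what is proved, stated in full; the proofs are below) =====
def Claim_equal_presence : Prop := ∀ (massive : List (String × List Int)), Dom_presence massive → Spec_presence massive (presence massive)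

-- ===== LEMMAS AND PROOFS =====

-- the comparison sorted2 (key = (fst, snd)) uses
def pvBef (a b : Int × Int) : Bool :=
  decide (a.1 < b.1) || (!decide (b.1 < a.1) && decide (a.2 < b.2))

theorem pv_sorted2_eq (xs : List (Int × Int)) :
    PySem.List.sorted2 xs Prod.fst Prod.snd =
      xs.foldl (fun acc x => PySem.List.insertBy pvBef x acc) [] := rfl

theorem pv_insertBy_nil (x : Int × Int) : PySem.List.insertBy pvBef x [] = [x] := rfl

theorem pv_insertBy_cons (x y : Int × Int) (ys : List (Int × Int)) :
    PySem.List.insertBy pvBef x (y :: ys) =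
      if pvBef x y then x :: y :: ys else y :: PySem.List.insertBy pvBef x ys := rfl

-- the order sorted2 produces: lexicographic ≤ on (time, border)
def pvR (a b : Int × Int) : Prop := pvBef b a = false

theorem pvR_iff (a b : Int × Int) : pvR a b ↔ (a.1 < b.1 ∨ (a.1 = b.1 ∧ a.2 ≤ b.2)) := by
  simp [pvR, pvBef]; omega

theorem pv_bef_true {x y : Int × Int} (h : pvBef x y = true) : pvR x y := by
  simp [pvBef] at h; rw [pvR_iff]; omega

theorem pv_bef_false {x y : Int × Int} (h : pvBef x y = false) : pvR y x := by
  simp [pvBef] at h; rw [pvR_iff]; omega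

theorem pvR_trans {x y z : Int × Int} (h1 : pvR x y) (h2 : pvR y z) : pvR x z := by
  rw [pvR_iff] at h1 h2 ⊢; omega

theorem pv_insertBy_pairwise (x : Int × Int) (l : List (Int × Int))
    (h : l.Pairwise pvR) : (PySem.List.insertBy pvBef x l).Pairwise pvR := by
  induction l with
  | nil => simp [pv_insertBy_nil]
  | cons y ys ih =>
    rw [pv_insertBy_cons]
    rcases List.pairwise_cons.mp h with ⟨hy, hys⟩
    split_ifs with hb
    · refine List.pairwise_cons.mpr ⟨?_, h⟩
      intro z hz
      rcases List.mem_cons.mp hz with hz | hz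
      · exact hz ▸ pv_bef_true hb
      · exact pvR_trans (pv_bef_true hb) (hy z hz)
    · refine List.pairwise_cons.mpr ⟨?_, ih hys⟩
      intro z hz
      by_cases hzx : z = x
      · exact hzx ▸ pv_bef_false (Bool.of_not_eq_true hb)
      · have hzy : z ∈ ys := by
          have := PySem.List.mem_insertBy (before := pvBef) (x := x) (ys := ys) (y := z)
          tauto
        exact hy z hzy

theorem pv_foldl_insertBy_pairwise (xs : List (Int × Int)) :
    ∀ acc : List (Int × Int), acc.Pairwise pvR →
      (xs.foldl (fun acc x => PySem.List.insertBy pvBef x acc) acc).Pairwise pvR := by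
  induction xs with
  | nil => intro acc h; simpa using h
  | cons x xs ih =>
    intro acc h
    simpa [List.foldl_cons] using ih _ (pv_insertBy_pairwise x acc h)

theorem pv_sorted2_pairwise (xs : List (Int × Int)) :
    (PySem.List.sorted2 xs Prod.fst Prod.snd).Pairwise pvR := by
  rw [pv_sorted2_eq]
  exact pv_foldl_insertBy_pairwise xs [] (List.Pairwise.nil)

-- every border produced by all_timestamps is -1 or 1
theorem pv_cycleZip_snd (ts : List Int) : ∀ b : Int, (b = -1 ∨ b = 1) →
    ∀ p ∈ pvCycleZip ts b, p.2 = -1 ∨ p.2 = 1 := by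
  induction ts with
  | nil => intro b _ p hp; simp [pvCycleZip] at hp
  | cons t ts ih =>
    intro b hb p hp
    simp [pvCycleZip] at hp
    rcases hp with hp | hp
    · subst hp; exact hb
    · exact ih (-b) (by omega) p hp

theorem pv_allTimestamps_snd (massive : List (String × List Int)) :
    ∀ p ∈ pvAllTimestamps massive, p.2 = -1 ∨ p.2 = 1 := by
  intro p hp
  simp [pvAllTimestamps, List.mem_flatMap] at hp
  rcases hp with ⟨a, b, hab, hmem⟩
  exact pv_cycleZip_snd b (-1) (Or.inl rfl) p hmem

-- sum of borders
def pvSum (l : List (Int × Int)) : Int := (l.map Prod.snd).sum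

theorem pvLoopA_append (xs ys : List (Int × Int)) : ∀ c : Int,
    pvLoopA c (xs ++ ys) = pvLoopA c xs ++ pvLoopA (c + pvSum xs) ys := by
  induction xs with
  | nil => intro c; simp [pvLoopA, pvSum]
  | cons x xs ih =>
    intro c
    simp only [List.cons_append, pvLoopA, ih (c + x.2), pvSum, List.map_cons, List.sum_cons]
    have : c + x.2 + (xs.map Prod.snd).sum = c + (x.2 + (xs.map Prod.snd).sum) := by ring
    rw [this]
    simp [List.append_assoc]

-- the descending half of a group
theorem pvLoopA_rep_neg (s : Nat) (t : Int) : ∀ c : Int,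
    pvLoopA c (List.replicate s (t, -1)) =
      if c ≥ -2 ∧ c - s ≤ -3 then [(t, (-1 : Int))] else [] := by
  induction s with
  | zero => intro c; simp [pvLoopA]; omega
  | succ s ih =>
    intro c
    simp only [List.replicate_succ, pvLoopA, ih (c + -1)]
    by_cases hc : c = -2
    · subst hc; norm_num
    · have h1 : ¬(c = -2 ∧ c + -1 = -3) := by omega
      have h2 : ¬(c = -3 ∧ c + -1 = -2) := by omega
      simp only [h1, h2, if_neg, if_false, List.nil_append]
      have : (c + -1 ≥ -2 ∧ c + -1 - (s : Int) ≤ -3) ↔ (c ≥ -2 ∧ c - ((s : Int) + 1) ≤ -3) := by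
        omega
      simp only [Nat.cast_succ]
      split_ifs with ha hb hb
      · rfl
      · omega
      · omega
      · rfl

-- the ascending half of a group
theorem pvLoopA_rep_pos (e : Nat) (t : Int) : ∀ m : Int,
    pvLoopA m (List.replicate e (t, 1)) =
      if m ≤ -3 ∧ m + e ≥ -2 then [(t, (1 : Int))] else [] := by
  induction e with
  | zero => intro m; simp [pvLoopA]; omega
  | succ e ih =>
    intro m
    simp only [List.replicate_succ, pvLoopA, ih (m + 1)]
    by_cases hm : m = -3
    · subst hm; norm_num
    · have h1 : ¬(m = -2 ∧ m + 1 = -3) := by omega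
      have h2 : ¬(m = -3 ∧ m + 1 = -2) := by omega
      simp only [h1, h2, if_neg, if_false, List.nil_append]
      have : (m + 1 ≤ -3 ∧ m + 1 + (e : Int) ≥ -2) ↔ (m ≤ -3 ∧ m + ((e : Int) + 1) ≥ -2) := by
        omega
      simp only [Nat.cast_succ]
      split_ifs with ha hb hb
      · rfl
      · omega
      · omega
      · rfl

-- a pairwise-ordered group at one timestamp with ±1 borders is starts-then-ends
theorem pv_group_shape (G : List (Int × Int)) (t : Int)
    (htime : ∀ p ∈ G, p.1 = t) (hpm : ∀ p ∈ G, p.2 = -1 ∨ p.2 = 1)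
    (hord : G.Pairwise pvR) :
    ∃ s e : Nat, G = List.replicate s (t, -1) ++ List.replicate e (t, 1) := by
  induction G with
  | nil => exact ⟨0, 0, rfl⟩
  | cons p G ih =>
    rcases List.pairwise_cons.mp hord with ⟨hp, hG⟩
    have hpt : p.1 = t := htime p (by simp)
    rcases hpm p (by simp) with hb | hb
    · rcases ih (fun q hq => htime q (by simp [hq])) (fun q hq => hpm q (by simp [hq])) hG
        with ⟨s, e, hse⟩
      refine ⟨s + 1, e, ?_⟩
      have hpe : p = (t, -1) := Prod.ext hpt hb
      simp [hse, hpe, List.replicate_succ]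
    · refine ⟨0, G.length + 1, ?_⟩
      have hpe : p = (t, 1) := Prod.ext hpt hb
      have hall : ∀ q ∈ G, q = (t, 1) := by
        intro q hq
        have h1 := htime q (by simp [hq])
        have h2 := hpm q (by simp [hq])
        have h3 := hp q hq
        rw [pvR_iff] at h3
        refine Prod.ext h1 ?_
        rcases h2 with h2 | h2
        · exfalso; rw [hpt, hb] at h3; omega
        · exact h2
      rw [List.replicate_zero, List.nil_append, List.replicate_succ, hpe]
      congr 1
      exact List.eq_replicate_of_mem hall

theorem pvGroupBy_cons (t b : Int) (rest : List (Int × Int)) :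
    pvGroupBy ((t, b) :: rest) =
      (t, b :: (rest.takeWhile (fun p => p.1 == t)).map Prod.snd) ::
        pvGroupBy (rest.dropWhile (fun p => p.1 == t)) := by
  rw [pvGroupBy.eq_def]

-- main invariant: on an ordered ±1-bordered list the two loops agree
theorem pv_loops_agree_aux : ∀ n : Nat, ∀ l : List (Int × Int), l.length ≤ n →
    l.Pairwise pvR → (∀ p ∈ l, p.2 = -1 ∨ p.2 = 1) →
    ∀ c : Int, pvLoopA c l = pvLoopB c (pvGroupBy l) := by
  intro n
  induction n with
  | zero =>
    intro l hlen _ _ c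
    have : l = [] := List.eq_nil_of_length_eq_zero (by omega)
    subst this
    simp [pvLoopA, pvGroupBy, pvLoopB]
  | succ n ih =>
    intro l hlen hord hpm c
    rcases l with _ | ⟨⟨t, b⟩, rest⟩
    · simp [pvLoopA, pvGroupBy, pvLoopB]
    · -- decompose into the first group and the remainder
      set g := rest.takeWhile (fun p => p.1 == t) with hg
      set r := rest.dropWhile (fun p => p.1 == t) with hr
      have hsplit : rest = g ++ r := (List.takeWhile_append_dropWhile).symm
      have hl : (t, b) :: rest = ((t, b) :: g) ++ r := by simp [hsplit]
      -- group facts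
      have htime : ∀ p ∈ (t, b) :: g, p.1 = t := by
        intro p hp
        rcases List.mem_cons.mp hp with hp | hp
        · rw [hp]
        · have := List.mem_takeWhile_imp (hg ▸ hp)
          simpa using this
      have hsub : ∀ p ∈ (t, b) :: g, p ∈ (t, b) :: rest := by
        intro p hp
        rcases List.mem_cons.mp hp with hp | hp
        · simp [hp]
        · have : p ∈ rest := (List.takeWhile_sublist _).mem (hg ▸ hp)
          simp [this]
      have hpmG : ∀ p ∈ (t, b) :: g, p.2 = -1 ∨ p.2 = 1 := fun p hp => hpm p (hsub p hp)
      have hordG : ((t, b) :: g).Pairwise pvR := by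
        rw [hl] at hord
        exact (List.pairwise_append.mp hord).1
      obtain ⟨s, e, hshape⟩ := pv_group_shape ((t, b) :: g) t htime hpmG hordG
      -- remainder facts
      have hrsub : r.Sublist rest := by rw [hr]; exact List.dropWhile_sublist _
      have hordR : r.Pairwise pvR := by
        rw [hl] at hord
        exact (List.pairwise_append.mp hord).2.1
      have hpmR : ∀ p ∈ r, p.2 = -1 ∨ p.2 = 1 := by
        intro p hp
        exact hpm p (by simp [hrsub.mem hp])
      have hlenR : r.length ≤ n := by
        have h1 := hrsub.length_le
        simp only [List.length_cons] at hlen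
        omega
      -- counts in the group
      have hcount : ((b :: g.map Prod.snd).count (-1 : Int)) = s := by
        have hbg : b :: g.map Prod.snd = ((t, b) :: g).map Prod.snd := by simp
        rw [hbg, hshape]
        simp [List.count_replicate]
      have hlength : (b :: g.map Prod.snd).length = s + e := by
        have hbg : b :: g.map Prod.snd = ((t, b) :: g).map Prod.snd := by simp
        rw [hbg, hshape]; simp
      have hsum : pvSum ((t, b) :: g) = (e : Int) - (s : Int) := by
        rw [pvSum, hshape]
        simp [List.map_replicate, List.sum_replicate]
        ring
      -- compute A's side: group halves then the remainder
      have hsum2 : pvSum (List.replicate s ((t : Int), (-1 : Int)) ++ List.replicate e ((t : Int), (1 : Int))) = (e : Int) - (s : Int) := by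
        rw [← hshape]; exact hsum
      have hsumneg : pvSum (List.replicate s ((t : Int), (-1 : Int))) = -(s : Int) := by
        simp [pvSum, List.map_replicate, List.sum_replicate]
      conv_lhs => rw [hl, pvLoopA_append, hshape, pvLoopA_append, pvLoopA_rep_neg,
        pvLoopA_rep_pos, hsumneg, hsum2]
      -- compute B's side: first group, then the recursive call via the IH
      rw [pvGroupBy_cons]
      rw [pvLoopB]
      simp only [← hg, ← hr]
      have hc : ((b :: g.map Prod.snd).count (-1 : Int) : Int) = (s : Int) := by
        exact_mod_cast congrArg (Nat.cast : Nat → Int) hcount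
      have hc2 : ((b :: g.map Prod.snd).length : Int) = (s : Int) + (e : Int) := by
        exact_mod_cast congrArg (Nat.cast : Nat → Int) hlength
      rw [hc, hc2]
      have harith : c - (s : Int) + ((s : Int) + (e : Int) - (s : Int)) = c + ((e : Int) - (s : Int)) := by ring
      rw [harith]
      rw [← ih r hlenR hordR hpmR (c + ((e : Int) - (s : Int)))]
      have hms : c + -(s : Int) = c - (s : Int) := by ring
      have hms2 : c - (s : Int) + (e : Int) = c + ((e : Int) - (s : Int)) := by ring
      rw [hms, hms2]

theorem pv_loops_agree (l : List (Int × Int)) (hord : l.Pairwise pvR)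
    (hpm : ∀ p ∈ l, p.2 = -1 ∨ p.2 = 1) (c : Int) :
    pvLoopA c l = pvLoopB c (pvGroupBy l) :=
  pv_loops_agree_aux l.length l (le_refl _) hord hpm c

-- ===== VERDICT (by name: the statement is the Claim_ definition above) =====
theorem presence_spec : Claim_equal_presence := by
  intro massive _
  unfold Spec_presence presence presence_alt
  exact pv_loops_agree _ (pv_sorted2_pairwise _)
    (fun p hp => pv_allTimestamps_snd massive p
      ((PySem.List.sorted2_perm _ _ _ _).mem_iff.mp hp)) 0
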